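-- pv_equiv track=rewrite | github.com/bitspace-cit-cdc/triple-d | 1480. Running Sum of 1d Array/ans.py | runningSum
-- ===== SOURCE A (Python) =====
-- def runningSum(nums):
--     result = []
--     current_sum = 0
--
--     for num in nums:
--         current_sum += num
--         result.append(current_sum)
--         if current_sum < 0:
--             current_sum = 0
--
--     return result
-- ===== SOURCE B (Python) =====
-- def runningSum(nums):
--     # Closed form: out[i] = P[i] - min(0, P[0], ..., P[i-1]) where P is the plain
--     # prefix-sum sequence; the running minimum of P plays the role of the reset points.
--     prefix = []
--     s = 0
--     for x in nums:
--         s += x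
--         prefix.append(s)
--     lows = [0]
--     m = 0
--     for p in prefix[:-1]:
--         m = min(m, p)
--         lows.append(m)
--     return [p - m for p, m in zip(prefix, lows)]
-- ===== Notes on version B (the rewrite author's own statement) =====
-- stated objective: alternative
-- what changed: Replaces the stateful reset loop by the closed-form identity out[i] = P[i] - min(0, min_{j<i} P[j]) over plain prefix sums, computed in three branch-free staged passes (prefix sums, running minima, elementwise subtraction).
import Mathlib
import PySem

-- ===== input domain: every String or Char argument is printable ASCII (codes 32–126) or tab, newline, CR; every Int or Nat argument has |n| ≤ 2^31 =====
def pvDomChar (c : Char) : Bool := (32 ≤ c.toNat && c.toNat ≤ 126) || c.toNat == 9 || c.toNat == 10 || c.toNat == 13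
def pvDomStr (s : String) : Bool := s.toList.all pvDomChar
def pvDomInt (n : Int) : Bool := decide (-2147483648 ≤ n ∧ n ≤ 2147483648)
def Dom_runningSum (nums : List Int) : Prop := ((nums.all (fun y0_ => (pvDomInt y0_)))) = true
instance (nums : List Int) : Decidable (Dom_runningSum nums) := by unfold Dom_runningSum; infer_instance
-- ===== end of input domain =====

-- B replaces A's stateful reset loop by the closed-form identity
-- out[i] = P[i] - min(0, min_{j<i} P[j]) over plain prefix sums P (three staged passes; same cost).

-- ===== PORT A =====
-- loop state: (result, current_sum); appends current_sum, resets it to 0 when negative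
def runningSum (nums : List Int) : List Int :=
  (nums.foldl (fun (st : List Int × Int) num =>
    let cs := st.2 + num
    (st.1 ++ [cs], if cs < 0 then 0 else cs)) ([], 0)).1

-- ===== PORT B =====
-- pass 1: plain prefix sums; pass 2: running minima lows[i] = min(0, P[0..i-1]); pass 3: subtract
def runningSum_alt (nums : List Int) : List Int :=
  let prefixSums := (nums.foldl (fun (st : List Int × Int) x =>
      (st.1 ++ [st.2 + x], st.2 + x)) ([], 0)).1
  let lows := (prefixSums.dropLast.foldl (fun (st : List Int × Int) p =>
      (st.1 ++ [min st.2 p], min st.2 p)) ([(0 : Int)], 0)).1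
  List.zipWith (fun p m => p - m) prefixSums lows

-- ===== PRECONDITION & SPEC =====
def Spec_runningSum (nums : List Int) (out : List Int) : Prop := out = runningSum_alt nums
instance (nums : List Int) (out : List Int) : Decidable (Spec_runningSum nums out) := by unfold Spec_runningSum; infer_instance

-- ===== CLAIM (what is proved, stated in full; the proofs are below) =====
def Claim_equal_runningSum : Prop := ∀ (nums : List Int), Dom_runningSum nums → Spec_runningSum nums (runningSum nums)

-- ===== LEMMAS AND PROOFS =====
-- generic scan (proof-only helper: canonical form of both of B's accumulator loops)
def pvScan (f : Int → Int → Int) (a : Int) : List Int → List Int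
  | [] => []
  | x :: xs => f a x :: pvScan f (f a x) xs

theorem pvScan_add (xs : List Int) (res : List Int) (s : Int) :
    (xs.foldl (fun (st : List Int × Int) x => (st.1 ++ [st.2 + x], st.2 + x)) (res, s)).1
      = res ++ pvScan (fun a b => a + b) s xs := by
  induction xs generalizing res s with
  | nil => simp [show pvScan (fun a b => a + b) s [] = ([] : List Int) from rfl]
  | cons x xs ih => simp [pvScan, ih]

theorem pvScan_min (xs : List Int) (res : List Int) (m : Int) :
    (xs.foldl (fun (st : List Int × Int) p => (st.1 ++ [min st.2 p], min st.2 p)) (res, m)).1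
      = res ++ pvScan min m xs := by
  induction xs generalizing res m with
  | nil => simp [pvScan]
  | cons x xs ih => simp [pvScan, ih]

-- zipWith only consumes the first |xs| lows, so the dropLast in B's second pass is immaterial
theorem pvZip_dropLast (xs : List Int) (m : Int) :
    List.zipWith (fun p l => p - l) xs (m :: pvScan min m xs.dropLast)
      = List.zipWith (fun p l => p - l) xs (m :: pvScan min m xs) := by
  induction xs generalizing m with
  | nil => rfl
  | cons x xs ih =>
    cases xs with
    | nil => simp [pvScan]
    | cons y ys =>
      have h := ih (min m x)
      simp only [List.dropLast_cons_of_ne_nil (by simp : y :: ys ≠ ([] : List Int)),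
        pvScan, List.zipWith, List.cons.injEq, true_and] at h ⊢
      exact h

-- main invariant: A's fold from carried sum s - m equals B's closed form offset by s, m
theorem runningSum_closed (xs : List Int) (res : List Int) (s m : Int) :
    (xs.foldl (fun (st : List Int × Int) num =>
      let cs := st.2 + num
      (st.1 ++ [cs], if cs < 0 then 0 else cs)) (res, s - m)).1
      = res ++ List.zipWith (fun p l => p - l) (pvScan (fun a b => a + b) s xs)
          (m :: pvScan min m (pvScan (fun a b => a + b) s xs)) := by
  induction xs generalizing res s m with
  | nil => simp [show pvScan (fun a b => a + b) s [] = ([] : List Int) from rfl]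
  | cons x xs ih =>
    simp only [List.foldl_cons, pvScan, List.zipWith]
    have h1 : s - m + x = s + x - m := by ring
    rw [h1]
    have h2 : (if s + x - m < 0 then (0 : Int) else s + x - m)
        = s + x - min m (s + x) := by split <;> omega
    rw [h2, ih (res ++ [s + x - m]) (s + x) (min m (s + x))]
    simp

-- ===== VERDICT (by name: the statement is the Claim_ definition above) =====
theorem runningSum_spec : Claim_equal_runningSum := by
  intro nums _
  show runningSum nums = runningSum_alt nums
  unfold runningSum runningSum_alt
  simp only [pvScan_add, pvScan_min, List.nil_append, List.singleton_append]
  rw [pvZip_dropLast]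
  have hc := runningSum_closed nums [] 0 0
  simp only [sub_zero, List.nil_append] at hc
  exact hc
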